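-- pv_equiv track=rewrite | github.com/HydrogenAcid/NEHD | ENTROPIARENYI.py | extraer_Patrones
-- ===== SOURCE A (Python) =====
-- def extraer_Patrones(matriz):
--     valores_aplanados = [elem for fila in matriz for elem in fila]
--     valores_unicos_ordenados = sorted(set(valores_aplanados))
--
--     mapeo = {}
--     for i, valor in enumerate(valores_unicos_ordenados, start=1):
--         mapeo[valor] = i
--
--     nueva_matriz = []
--     for fila in matriz:
--         nueva_fila = [mapeo[val] for val in fila]
--         nueva_matriz.append(nueva_fila)
--
--     return nueva_matriz
-- ===== SOURCE B (Python) =====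
-- def extraer_Patrones(matriz):
--     triples = []
--     for i, fila in enumerate(matriz):
--         for j, v in enumerate(fila):
--             triples.append((v, i, j))
--     triples.sort(key=lambda t: t[0])
--     salida = [[0] * len(fila) for fila in matriz]
--     rank = 0
--     prev = None
--     for v, i, j in triples:
--         if rank == 0 or v != prev:
--             rank += 1
--             prev = v
--         salida[i][j] = rank
--     return salida
-- ===== Notes on version B (the rewrite author's own statement) =====
-- stated objective: alternative
-- what changed: Replaces A's build-a-dict-from-sorted-uniques-then-look-up-every-cell with a single sort of (value,row,col) triples followed by one sweep that increments a rank counter on value changes and writes ranks into a pre-allocated matrix; no set and no dict are built.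
import Mathlib
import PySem

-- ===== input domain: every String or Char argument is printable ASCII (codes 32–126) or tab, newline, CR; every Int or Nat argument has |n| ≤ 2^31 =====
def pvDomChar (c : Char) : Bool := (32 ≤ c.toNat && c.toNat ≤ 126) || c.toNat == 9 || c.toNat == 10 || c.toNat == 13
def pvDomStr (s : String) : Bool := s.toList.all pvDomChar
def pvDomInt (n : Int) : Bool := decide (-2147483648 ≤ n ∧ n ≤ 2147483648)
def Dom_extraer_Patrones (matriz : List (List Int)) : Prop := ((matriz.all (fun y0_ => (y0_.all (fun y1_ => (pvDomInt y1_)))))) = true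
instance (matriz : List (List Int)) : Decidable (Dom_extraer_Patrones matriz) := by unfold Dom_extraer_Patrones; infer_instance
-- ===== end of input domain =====

-- B replaces A's sorted-unique set + lookup dict by one sort of (value,row,col)
-- triples and a single rank-counting sweep into a pre-allocated matrix (alternative
-- algorithm of the same asymptotic cost).

-- ===== PORT A =====
def extraer_Patrones (matriz : List (List Int)) : List (List Int) :=
  let valores_aplanados := matriz.flatMap (fun fila => fila)
  let valores_unicos_ordenados :=
    PySem.List.sorted (PySem.Set.ofList valores_aplanados) (fun x => x) false
  let mapeo := (PySem.List.enumerate valores_unicos_ordenados 1).foldl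
      (fun d p => d.insert p.2 p.1) (PySem.Dict.empty : PySem.Dict Int Int)
  -- mapeo[val]: the key is always present (val occurs in the flattened values),
  -- so Python's d[val] is exactly getD val 0 here (the default is unreachable)
  matriz.foldl (fun acc fila => acc ++ [fila.map (fun val => mapeo.getD val 0)]) []

-- ===== PORT B =====
-- salida[i][j] = rank: i, j come from enumerate, hence are ≥ 0 and in range, so
-- Int.toNat with List.modify/List.set is exact (no negative-index wraparound occurs)
def pvWrite (sal : List (List Int)) (i j : Int) (r : Int) : List (List Int) :=
  sal.modify i.toNat (fun row => row.set j.toNat r)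

-- the body of B's sweep loop: bump (rank, prev) on a fresh value, then write
def pvStep (st : List (List Int) × Int × Option Int) (t : Int × Int × Int) :
    List (List Int) × Int × Option Int :=
  let rp := if st.2.1 == 0 || some t.1 != st.2.2 then (st.2.1 + 1, some t.1) else st.2
  (pvWrite st.1 t.2.1 t.2.2 rp.1, rp)

def extraer_Patrones_alt (matriz : List (List Int)) : List (List Int) :=
  let triples := (PySem.List.enumerate matriz 0).flatMap (fun p =>
      (PySem.List.enumerate p.2 0).map (fun q => (q.2, p.1, q.1)))
  let triples := PySem.List.sorted triples (fun t => t.1) false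
  let salida := matriz.map (fun fila => List.replicate fila.length 0)
  (triples.foldl pvStep (salida, 0, none)).1

-- ===== PRECONDITION & SPEC =====
def Spec_extraer_Patrones (matriz : List (List Int)) (out : List (List Int)) : Prop := out = extraer_Patrones_alt matriz
instance (matriz : List (List Int)) (out : List (List Int)) : Decidable (Spec_extraer_Patrones matriz out) := by unfold Spec_extraer_Patrones; infer_instance

-- ===== CLAIM (what is proved, stated in full; the proofs are below) =====
def Claim_equal_extraer_Patrones : Prop := ∀ (matriz : List (List Int)), Dom_extraer_Patrones matriz → Spec_extraer_Patrones matriz (extraer_Patrones matriz)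

-- ===== LEMMAS AND PROOFS =====

-- the sorted list of distinct flattened values, and the rank function both sides compute
def pvU (matriz : List (List Int)) : List Int :=
  PySem.List.sorted (PySem.Set.ofList (matriz.flatMap (fun fila => fila))) (fun x => x) false

def pvRank (matriz : List (List Int)) (v : Int) : Int := 1 + (pvU matriz).idxOf v

-- the (value, row, col) triples in matrix order
def pvAllT (matriz : List (List Int)) : List (Int × Int × Int) :=
  (PySem.List.enumerate matriz 0).flatMap (fun p =>
      (PySem.List.enumerate p.2 0).map (fun q => (q.2, p.1, q.1)))

-- the plain write fold that the sweep is shown to implement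
def pvWF (g : Int → Int) (s : List (List Int)) (t : Int × Int × Int) : List (List Int) :=
  pvWrite s t.2.1 t.2.2 (g t.1)

theorem pv_foldl_append_singleton (l : List (List Int)) (g : List Int → List Int)
    (acc : List (List Int)) :
    l.foldl (fun a fila => a ++ [g fila]) acc = acc ++ l.map g := by
  induction l generalizing acc with
  | nil => simp
  | cons x xs ih => simp [List.foldl_cons, ih]

theorem pv_dict_skip (v : Int) (xs : List (Int × Int)) (d : PySem.Dict Int Int)
    (h : ∀ p ∈ xs, p.2 ≠ v) :
    (xs.foldl (fun d p => d.insert p.2 p.1) d).getD v 0 = d.getD v 0 := by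
  induction xs generalizing d with
  | nil => rfl
  | cons p xs ih =>
    rw [List.foldl_cons, ih _ (fun q hq => h q (List.mem_cons_of_mem _ hq)),
      PySem.Dict.getD_insert_of_ne _ _ _ (Ne.symm (h p (List.mem_cons_self)))]

theorem pv_dict_getD (l : List Int) (v : Int) :
    ∀ (s : Int) (d : PySem.Dict Int Int), l.Nodup → v ∈ l →
    ((PySem.List.enumerate l s).foldl (fun d p => d.insert p.2 p.1) d).getD v 0
      = s + (l.idxOf v : Int) := by
  induction l with
  | nil => intro s d _ hv; exact absurd hv (List.not_mem_nil)
  | cons a t ih =>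
    intro s d hnd hv
    rw [PySem.List.enumerate_cons, List.foldl_cons]
    by_cases hva : v = a
    · subst hva
      have hnotin : v ∉ t := (List.nodup_cons.mp hnd).1
      rw [pv_dict_skip v _ _ (fun p hp => by
          intro hpv
          exact hnotin (hpv ▸ (by
            have := List.mem_map_of_mem (f := fun x : Int × Int => x.2) hp
            rwa [PySem.List.map_snd_enumerate] at this)))]
      simp
    · have hvt : v ∈ t := by
        rcases List.mem_cons.mp hv with h | h
        · exact absurd h hva
        · exact h
      rw [ih (s + 1) _ (List.nodup_cons.mp hnd).2 hvt, List.idxOf_cons]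
      have hbeq : (a == v) = false := by simp [Ne.symm hva]
      rw [hbeq]
      simp only [cond_false]
      push_cast
      ring

theorem pv_idxOf_min (u : List Int) (v : Int) (hu : u.Pairwise (· < ·)) (hv : v ∈ u)
    (hmin : ∀ w ∈ u, v ≤ w) : u.idxOf v = 0 := by
  cases u with
  | nil => exact absurd hv (List.not_mem_nil)
  | cons b t =>
    by_cases hvb : v = b
    · subst hvb; simp
    · have hvt : v ∈ t := by
        rcases List.mem_cons.mp hv with h | h
        · exact absurd h hvb
        · exact h
      have h1 : b < v := (List.pairwise_cons.mp hu).1 v hvt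
      have h2 : v ≤ b := hmin b (List.mem_cons_self)
      exact absurd h1 (not_lt.mpr h2)

theorem pv_idxOf_succ (u : List Int) (pv v : Int) (hu : u.Pairwise (· < ·))
    (hpv : pv ∈ u) (hv : v ∈ u) (hlt : pv < v)
    (hnext : ∀ w ∈ u, pv < w → v ≤ w) : u.idxOf v = u.idxOf pv + 1 := by
  induction u with
  | nil => exact absurd hv (List.not_mem_nil)
  | cons b t ih =>
    have hbt := (List.pairwise_cons.mp hu).1
    have hpt := (List.pairwise_cons.mp hu).2
    have hvb : v ≠ b := by
      intro hvb; subst hvb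
      rcases List.mem_cons.mp hpv with h | h
      · omega
      · exact absurd (lt_trans (hbt pv h) hlt) (lt_irrefl v)
    have hvt : v ∈ t := by
      rcases List.mem_cons.mp hv with h | h
      · exact absurd h hvb
      · exact h
    have hbvf : (b == v) = false := by simp [Ne.symm hvb]
    rcases List.mem_cons.mp hpv with hpb | hpt'
    · subst hpb
      rw [List.idxOf_cons, List.idxOf_cons, hbvf]
      simp only [BEq.rfl, cond_true, cond_false]
      rw [pv_idxOf_min t v hpt hvt (fun w hw => hnext w (List.mem_cons_of_mem _ hw) (hbt w hw))]
    · have hbp : (b == pv) = false := by simp [ne_of_lt (hbt pv hpt')]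
      rw [List.idxOf_cons, List.idxOf_cons, hbvf, hbp]
      simp only [cond_false]
      rw [ih hpt hpt' hvt (fun w hw hlw => hnext w (List.mem_cons_of_mem _ hw) hlw)]

-- the sweep computes exactly the writes of the rank function
theorem pv_sweep (u : List Int) (hu : u.Pairwise (· < ·)) :
    ∀ (ts : List (Int × Int × Int)) (sal : List (List Int)) (rank : Int) (prev : Option Int),
    ts.Pairwise (fun a b => a.1 ≤ b.1) →
    (∀ t ∈ ts, t.1 ∈ u) →
    ((prev = none ∧ rank = 0 ∧ ∀ w ∈ u, ∃ t ∈ ts, t.1 = w) ∨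
      (∃ pv, prev = some pv ∧ pv ∈ u ∧ rank = 1 + (u.idxOf pv : Int) ∧
        (∀ t ∈ ts, pv ≤ t.1) ∧ (∀ w ∈ u, pv < w → ∃ t ∈ ts, t.1 = w))) →
    (ts.foldl pvStep (sal, rank, prev)).1
      = ts.foldl (pvWF (fun v => 1 + (u.idxOf v : Int))) sal := by
  intro ts
  induction ts with
  | nil => intro sal rank prev _ _ _; rfl
  | cons t ts ih =>
    intro sal rank prev hpw hmem hinv
    have hhead := (List.pairwise_cons.mp hpw).1
    have hpw' := (List.pairwise_cons.mp hpw).2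
    rw [List.foldl_cons, List.foldl_cons]
    rcases hinv with ⟨hprev, hrank, hcov⟩ | ⟨pv, hprev, hpvu, hrank, hle, hcov⟩
    · subst hprev; subst hrank
      have hidx : u.idxOf t.1 = 0 := by
        apply pv_idxOf_min u t.1 hu (hmem t List.mem_cons_self)
        intro w hw
        rcases hcov w hw with ⟨t', ht', rfl⟩
        rcases List.mem_cons.mp ht' with h | h
        · rw [h]
        · exact hhead t' h
      have hstep : pvStep (sal, 0, none) t
          = (pvWF (fun v => 1 + (u.idxOf v : Int)) sal t, 1 + (u.idxOf t.1 : Int), some t.1) := by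
        simp [pvStep, pvWF, hidx]
      rw [hstep]
      refine ih _ _ _ hpw' (fun t' ht' => hmem t' (List.mem_cons_of_mem _ ht')) ?_
      refine Or.inr ⟨t.1, rfl, hmem t List.mem_cons_self, rfl, hhead, ?_⟩
      intro w hw hlw
      rcases hcov w hw with ⟨t', ht', rfl⟩
      rcases List.mem_cons.mp ht' with h | h
      · exact absurd hlw (by rw [h]; exact lt_irrefl _)
      · exact ⟨t', h, rfl⟩
    · subst hprev
      have hnn : (0 : Int) ≤ (u.idxOf pv : Int) := Int.natCast_nonneg _
      have hne0 : rank ≠ 0 := by omega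
      by_cases hv : t.1 = pv
      · have hstep : pvStep (sal, rank, some pv) t
            = (pvWF (fun v => 1 + (u.idxOf v : Int)) sal t, rank, some pv) := by
          have hne1 : ¬(1 + (u.idxOf pv : Int) = 0) := by omega
          simp [pvStep, pvWF, hv, hrank, hne1]
        rw [hstep]
        refine ih _ _ _ hpw' (fun t' ht' => hmem t' (List.mem_cons_of_mem _ ht')) ?_
        refine Or.inr ⟨pv, rfl, hpvu, hrank, fun t' ht' => hle t' (List.mem_cons_of_mem _ ht'), ?_⟩
        intro w hw hlw
        rcases hcov w hw hlw with ⟨t', ht', rfl⟩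
        rcases List.mem_cons.mp ht' with h | h
        · exact absurd hlw (by rw [h, hv]; exact lt_irrefl _)
        · exact ⟨t', h, rfl⟩
      · have hplt : pv < t.1 := lt_of_le_of_ne (hle t List.mem_cons_self) (fun h => hv h.symm)
        have hidx : u.idxOf t.1 = u.idxOf pv + 1 := by
          apply pv_idxOf_succ u pv t.1 hu hpvu (hmem t List.mem_cons_self) hplt
          intro w hw hlw
          rcases hcov w hw hlw with ⟨t', ht', rfl⟩
          rcases List.mem_cons.mp ht' with h | h
          · rw [h]
          · exact hhead t' h
        have hstep : pvStep (sal, rank, some pv) t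
            = (pvWF (fun v => 1 + (u.idxOf v : Int)) sal t, 1 + (u.idxOf t.1 : Int), some t.1) := by
          have harr : 1 + (u.idxOf pv : Int) + 1 = 1 + (u.idxOf t.1 : Int) := by
            rw [hidx]; push_cast; ring
          simp [pvStep, pvWF, hv, hrank, harr]
        rw [hstep]
        refine ih _ _ _ hpw' (fun t' ht' => hmem t' (List.mem_cons_of_mem _ ht')) ?_
        refine Or.inr ⟨t.1, rfl, hmem t List.mem_cons_self, rfl, hhead, ?_⟩
        intro w hw hlw
        rcases hcov w hw (lt_trans hplt hlw) with ⟨t', ht', rfl⟩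
        rcases List.mem_cons.mp ht' with h | h
        · exact absurd hlw (by rw [h]; exact lt_irrefl _)
        · exact ⟨t', h, rfl⟩

theorem pv_modify_comm (sal : List (List Int)) (a b : Nat) (g h : List Int → List Int)
    (hab : a ≠ b) : (sal.modify a g).modify b h = (sal.modify b h).modify a g := by
  apply List.ext_getElem
  · simp [List.length_modify]
  · intro i h1 h2
    simp only [List.getElem_modify]
    by_cases hai : a = i <;> by_cases hbi : b = i
    · exact absurd (hai.trans hbi.symm) hab
    · simp [hai, hbi]
    · simp [hai, hbi]
    · simp [hai, hbi]

theorem pv_modify_modify (sal : List (List Int)) (a : Nat) (g h : List Int → List Int) :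
    (sal.modify a g).modify a h = sal.modify a (fun r => h (g r)) := by
  apply List.ext_getElem
  · simp [List.length_modify]
  · intro i h1 h2
    simp only [List.getElem_modify]
    by_cases hai : a = i <;> simp [hai]

theorem pv_mem_allT (m : List (List Int)) (t : Int × Int × Int) :
    t ∈ pvAllT m ↔ ∃ (i : Nat) (hi : i < m.length) (j : Nat) (hj : j < m[i].length),
      t = (m[i][j], (i : Int), (j : Int)) := by
  unfold pvAllT
  constructor
  · intro ht
    rcases List.mem_flatMap.mp ht with ⟨p, hp, htp⟩
    rcases (PySem.List.mem_enumerate_iff _ _ _).mp hp with ⟨i, hi, rfl⟩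
    rcases List.mem_map.mp htp with ⟨q, hq, rfl⟩
    rcases (PySem.List.mem_enumerate_iff _ _ _).mp hq with ⟨j, hj, rfl⟩
    exact ⟨i, hi, j, hj, by simp⟩
  · rintro ⟨i, hi, j, hj, rfl⟩
    apply List.mem_flatMap.mpr
    refine ⟨(0 + (i : Int), m[i]), ?_, ?_⟩
    · exact (PySem.List.mem_enumerate_iff _ _ _).mpr ⟨i, hi, rfl⟩
    · apply List.mem_map.mpr
      refine ⟨(0 + (j : Int), m[i][j]), ?_, by simp⟩
      exact (PySem.List.mem_enumerate_iff _ _ _).mpr ⟨j, hj, rfl⟩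

theorem pv_allT_fst (m : List (List Int)) (w : Int) :
    (∃ t ∈ pvAllT m, t.1 = w) ↔ w ∈ m.flatMap (fun fila => fila) := by
  constructor
  · rintro ⟨t, ht, rfl⟩
    rcases (pv_mem_allT m t).mp ht with ⟨i, hi, j, hj, rfl⟩
    exact List.mem_flatMap.mpr ⟨m[i], List.getElem_mem hi, List.getElem_mem hj⟩
  · intro hw
    rcases List.mem_flatMap.mp hw with ⟨fila, hf, hwf⟩
    rcases List.mem_iff_getElem.mp hf with ⟨i, hi, hfi⟩
    subst hfi
    rcases List.mem_iff_getElem.mp hwf with ⟨j, hj, hwj⟩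
    exact ⟨(m[i][j], (i : Int), (j : Int)),
      (pv_mem_allT m _).mpr ⟨i, hi, j, hj, rfl⟩, hwj⟩

theorem pv_set_append (pre : List Int) (x y : Int) (rest : List Int) :
    (pre ++ x :: rest).set pre.length y = pre ++ y :: rest := by
  induction pre with
  | nil => rfl
  | cons p pre ih => simp [List.set_cons_succ, ih]

theorem pv_modify_append (pre : List (List Int)) (x : List Int) (rest : List (List Int))
    (f : List Int → List Int) :
    (pre ++ x :: rest).modify pre.length f = pre ++ f x :: rest := by
  induction pre with
  | nil => rfl
  | cons p pre ih => simpa [List.modify_cons] using ih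

theorem pv_row_fold (g : Int → Int) (qs : List (Int × Int)) :
    ∀ (sal : List (List Int)) (i : Nat),
    qs.foldl (fun s q => s.modify i (fun row => row.set q.1.toNat (g q.2))) sal
      = sal.modify i (fun row => qs.foldl (fun r q => r.set q.1.toNat (g q.2)) row) := by
  induction qs with
  | nil =>
    intro sal i
    simp only [List.foldl_nil]
    exact (List.modify_id (l := sal) (i := i)).symm
  | cons q qs ih =>
    intro sal i
    rw [List.foldl_cons, ih, pv_modify_modify]
    rfl

theorem pv_set_fill (g : Int → Int) (fila : List Int) :
    ∀ (pre rest : List Int), rest.length = fila.length →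
    (PySem.List.enumerate fila (pre.length : Int)).foldl
        (fun r q => r.set q.1.toNat (g q.2)) (pre ++ rest)
      = pre ++ fila.map g := by
  induction fila with
  | nil =>
    intro pre rest h
    have hr : rest = [] := List.eq_nil_of_length_eq_zero h
    subst hr
    simp [PySem.List.enumerate]
  | cons a fila ih =>
    intro pre rest h
    cases rest with
    | nil => simp at h
    | cons c rest =>
      rw [PySem.List.enumerate_cons, List.foldl_cons]
      have h1 : ((pre.length : Int)).toNat = pre.length := by simp
      simp only [h1]
      rw [pv_set_append]
      have h2 : (pre ++ g a :: rest) = (pre ++ [g a]) ++ rest := by simp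
      have h3 : (pre.length : Int) + 1 = (((pre ++ [g a]).length : Nat) : Int) := by simp
      rw [h2, h3, ih (pre ++ [g a]) rest (by simpa using h)]
      simp

theorem pv_fill_all (g : Int → Int) (rows : List (List Int)) :
    ∀ (preSal : List (List Int)),
    ((PySem.List.enumerate rows (preSal.length : Int)).flatMap (fun p =>
        (PySem.List.enumerate p.2 0).map (fun q => (q.2, p.1, q.1)))).foldl (pvWF g)
      (preSal ++ rows.map (fun r => List.replicate r.length 0))
    = preSal ++ rows.map (fun r => r.map g) := by
  induction rows with
  | nil => intro preSal; simp [PySem.List.enumerate]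
  | cons fila rows ih =>
    intro preSal
    rw [PySem.List.enumerate_cons, List.flatMap_cons, List.foldl_append, List.foldl_map]
    have hstep : (fun (s : List (List Int)) (q : Int × Int) =>
        pvWF g s (q.2, (preSal.length : Int), q.1))
        = fun s q => s.modify preSal.length (fun row => row.set q.1.toNat (g q.2)) := by
      funext s q
      simp [pvWF, pvWrite]
    rw [hstep, List.map_cons]
    rw [pv_row_fold, pv_modify_append]
    have hfill := pv_set_fill g fila [] (List.replicate fila.length 0) (by simp)
    simp only [List.nil_append, List.length_nil, Nat.cast_zero] at hfill
    rw [hfill]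
    have hre : (preSal.length : Int) + 1 = (((preSal ++ [fila.map g]).length : Nat) : Int) := by simp
    have hli : preSal ++ fila.map g :: rows.map (fun r => List.replicate r.length (0 : Int))
        = (preSal ++ [fila.map g]) ++ rows.map (fun r => List.replicate r.length 0) := by simp
    rw [hre, hli, ih]
    simp

theorem pv_wf_perm (m : List (List Int)) (g : Int → Int) (sal : List (List Int)) :
    (PySem.List.sorted (pvAllT m) (fun t => t.1) false).foldl (pvWF g) sal
      = (pvAllT m).foldl (pvWF g) sal := by
  refine List.Perm.foldl_eq' (PySem.List.sorted_perm _ _ _) ?_ sal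
  intro x hx y hy z
  rw [PySem.List.mem_sorted] at hx hy
  rcases (pv_mem_allT m x).mp hx with ⟨i, hi, j, hj, rfl⟩
  rcases (pv_mem_allT m y).mp hy with ⟨i', hi', j', hj', rfl⟩
  simp only [pvWF, pvWrite, Int.toNat_natCast]
  by_cases hii : i = i'
  · subst hii
    by_cases hjj : j = j'
    · subst hjj; rfl
    · rw [pv_modify_modify, pv_modify_modify]
      congr 1
      funext r
      exact List.set_comm _ _ hjj
  · exact pv_modify_comm _ _ _ _ _ hii

theorem pvU_pairwise (m : List (List Int)) : (pvU m).Pairwise (· < ·) := by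
  exact PySem.List.sorted_ofList_pairwise_lt _

theorem pv_mem_U (m : List (List Int)) (v : Int) :
    v ∈ pvU m ↔ v ∈ m.flatMap (fun fila => fila) := by
  unfold pvU
  rw [PySem.List.mem_sorted, PySem.Set.mem_ofList]

theorem pv_A_eq (m : List (List Int)) :
    extraer_Patrones m = m.map (fun fila => fila.map (pvRank m)) := by
  unfold extraer_Patrones
  rw [pv_foldl_append_singleton, List.nil_append]
  apply List.map_congr_left
  intro fila hf
  apply List.map_congr_left
  intro val hval
  have hmem : val ∈ pvU m := (pv_mem_U m val).mpr (List.mem_flatMap.mpr ⟨fila, hf, hval⟩)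
  have hnd : (pvU m).Nodup := (pvU_pairwise m).imp (fun h => ne_of_lt h)
  unfold pvRank
  exact pv_dict_getD (pvU m) val 1 _ hnd hmem

theorem pv_B_eq (m : List (List Int)) :
    extraer_Patrones_alt m = m.map (fun fila => fila.map (pvRank m)) := by
  have hpair : (PySem.List.sorted (pvAllT m) (fun t => t.1) false).Pairwise
      (fun a b => a.1 ≤ b.1) := PySem.List.sorted_pairwise _ _
  have hmem : ∀ t ∈ PySem.List.sorted (pvAllT m) (fun t => t.1) false, t.1 ∈ pvU m := by
    intro t ht
    rw [PySem.List.mem_sorted] at ht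
    exact (pv_mem_U m t.1).mpr ((pv_allT_fst m t.1).mp ⟨t, ht, rfl⟩)
  have hcov : ∀ w ∈ pvU m, ∃ t ∈ PySem.List.sorted (pvAllT m) (fun t => t.1) false, t.1 = w := by
    intro w hw
    rcases (pv_allT_fst m w).mpr ((pv_mem_U m w).mp hw) with ⟨t, ht, rfl⟩
    exact ⟨t, (PySem.List.mem_sorted _ _ _ _).mpr ht, rfl⟩
  have h1 := pv_sweep (pvU m) (pvU_pairwise m)
      (PySem.List.sorted (pvAllT m) (fun t => t.1) false)
      (m.map (fun fila => List.replicate fila.length 0)) 0 none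
      hpair hmem (Or.inl ⟨rfl, rfl, hcov⟩)
  have h2 := pv_fill_all (fun v => 1 + ((pvU m).idxOf v : Int)) m []
  simp only [List.nil_append, List.length_nil, Nat.cast_zero] at h2
  show ((PySem.List.sorted (pvAllT m) (fun t => t.1) false).foldl pvStep
      (m.map (fun fila => List.replicate fila.length 0), 0, none)).1
    = m.map (fun fila => fila.map (pvRank m))
  rw [h1, pv_wf_perm]
  exact h2

-- ===== VERDICT (by name: the statement is the Claim_ definition above) =====
theorem extraer_Patrones_spec : Claim_equal_extraer_Patrones := by
  intro m _
  unfold Spec_extraer_Patrones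
  rw [pv_A_eq, pv_B_eq]
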